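-- pv_equiv track=rewrite | github.com/SamLB9/Edvance | src/dynamic_latex_generator.py | normalize_color_names
-- ===== SOURCE A (Python) =====
-- def normalize_color_names(body: str) -> str:
--     """Map LLM-invented color names to predefined ones."""
--     color_map = {
--         "blueMain": "primary",
--         "blueAccent": "secondary",
--         "blueLight": "accent",
--         "grayLight": "lightgray"
--     }
--     for old_name, new_name in color_map.items():
--         body = body.replace(f"\\color{{{old_name}}}", f"\\color{{{new_name}}}")
--     return body
-- ===== SOURCE B (Python) =====
-- def normalize_color_names(body: str) -> str:
--     """Map LLM-invented color names to predefined ones (single left-to-right scan)."""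
--     color_map = {
--         "blueMain": "primary",
--         "blueAccent": "secondary",
--         "blueLight": "accent",
--         "grayLight": "lightgray"
--     }
--     rules = [("\\color{" + old + "}", "\\color{" + new + "}")
--              for old, new in color_map.items()]
--     out = []
--     i = 0
--     n = len(body)
--     while i < n:
--         for token, repl in rules:
--             if body.startswith(token, i):
--                 out.append(repl)
--                 i += len(token)
--                 break
--         else:
--             out.append(body[i])
--             i += 1
--     return "".join(out)
-- ===== Notes on version B (the rewrite author's own statement) =====
-- stated objective: alternative
-- what changed: B replaces A's four sequential full-string str.replace passes (one per color name) with a single left-to-right scan that, at each position, matches one \color{name} token against a precomputed rule table and emits the mapped replacement once.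
import Mathlib
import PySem

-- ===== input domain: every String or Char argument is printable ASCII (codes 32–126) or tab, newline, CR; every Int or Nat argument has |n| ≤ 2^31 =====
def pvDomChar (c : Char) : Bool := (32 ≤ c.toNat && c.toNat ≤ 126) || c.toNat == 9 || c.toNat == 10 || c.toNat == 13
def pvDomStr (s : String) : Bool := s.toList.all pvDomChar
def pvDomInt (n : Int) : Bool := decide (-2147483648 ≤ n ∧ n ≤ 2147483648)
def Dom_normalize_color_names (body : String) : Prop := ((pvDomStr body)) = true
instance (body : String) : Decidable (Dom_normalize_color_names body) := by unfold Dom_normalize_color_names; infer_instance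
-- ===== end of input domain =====

set_option maxRecDepth 10000


-- B replaces A's four sequential full-string replace passes with one left-to-right scan
-- that matches a \color{name} token once and emits the mapped replacement (alternative
-- decomposition, same result).

-- ===== PORT A =====
def normalize_color_names (body : String) : String :=
  let color_map : PySem.Dict String String :=
    PySem.Dict.mk [("blueMain", "primary"), ("blueAccent", "secondary"),
                   ("blueLight", "accent"), ("grayLight", "lightgray")]
  color_map.items.foldl
    (fun b p => PySem.Str.replace b ("\\color{" ++ p.1 ++ "}") ("\\color{" ++ p.2 ++ "}"))
    body

-- ===== PORT B =====
-- the precomputed (token, replacement) rules of Source B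
def nRules : List (List Char × List Char) :=
  [("blueMain", "primary"), ("blueAccent", "secondary"),
   ("blueLight", "accent"), ("grayLight", "lightgray")].map
    (fun p => (("\\color{" ++ p.1 ++ "}").toList, ("\\color{" ++ p.2 ++ "}").toList))

-- Source B's while-loop: at each position try the rules in order, else copy one char
def nScan : List Char → List Char
  | [] => []
  | c :: t =>
    match nRules.find? (fun r => r.1.isPrefixOf (c :: t)) with
    | some r => r.2 ++ nScan (t.drop (r.1.length - 1))
    | none => c :: nScan t
termination_by l => l.length
decreasing_by all_goals simp

def normalize_color_names_alt (body : String) : String :=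
  String.ofList (nScan body.toList)

-- ===== PRECONDITION & SPEC =====
def Spec_normalize_color_names (body : String) (out : String) : Prop := out = normalize_color_names_alt body
instance (body : String) (out : String) : Decidable (Spec_normalize_color_names body out) := by unfold Spec_normalize_color_names; infer_instance

-- ===== CLAIM (what is proved, stated in full; the proofs are below) =====
def Claim_equal_normalize_color_names : Prop := ∀ (body : String), Dom_normalize_color_names body → Spec_normalize_color_names body (normalize_color_names body)

-- ===== LEMMAS AND PROOFS =====

-- clean structural form of Python str.replace (left-to-right, non-overlapping), for old ≠ []
def repC (old new : List Char) : List Char → List Char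
  | [] => []
  | c :: t =>
    if old.isPrefixOf (c :: t) then new ++ repC old new (t.drop (old.length - 1))
    else c :: repC old new t
termination_by l => l.length
decreasing_by all_goals simp

theorem repC_nil (old new : List Char) : repC old new [] = [] := by
  simp [repC]

theorem repC_cons (old new : List Char) (c : Char) (t : List Char) :
    repC old new (c :: t) =
      if old.isPrefixOf (c :: t) then new ++ repC old new (t.drop (old.length - 1))
      else c :: repC old new t := by
  rw [repC]

theorem go_eq_repC (old new : List Char) (hold : old ≠ []) :
    ∀ (fuel : ℕ) (l acc : List Char), l.length ≤ fuel →
      PySem.Chars.replace.go old new fuel l acc = acc.reverse ++ repC old new l := by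
  intro fuel
  induction fuel with
  | zero =>
    intro l acc h
    have hl : l = [] := by cases l with
      | nil => rfl
      | cons c t => simp at h
    subst hl
    rw [PySem.Chars.replace.go.eq_def]
    simp [repC_nil]
  | succ n IH =>
    intro l acc h
    cases l with
    | nil =>
      rw [PySem.Chars.replace.go.eq_def]
      simp [repC_nil]
    | cons c t =>
      rw [PySem.Chars.replace.go.eq_def]
      simp only []
      rw [repC_cons]
      by_cases hp : old.isPrefixOf (c :: t) = true
      · rw [if_pos hp, if_pos hp]
        obtain ⟨o, os, rfl⟩ : ∃ o os, old = o :: os := by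
          cases old with
          | nil => exact absurd rfl hold
          | cons o os => exact ⟨o, os, rfl⟩
        have hdrop : List.drop (o :: os).length (c :: t) = t.drop ((o :: os).length - 1) := by
          simp
        rw [hdrop, IH _ _ (by simp at h ⊢; omega)]
        simp
      · rw [if_neg hp, if_neg hp]
        rw [IH _ _ (by simp at h; omega)]
        simp

theorem replace_eq_repC (s old new : List Char) (hold : old ≠ []) :
    PySem.Chars.replace s old new = repC old new s := by
  unfold PySem.Chars.replace
  rw [if_neg (by simp [List.isEmpty_iff]; exact hold)]
  rw [go_eq_repC old new hold s.length s [] (le_refl _)]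
  simp

-- copies backslash-free text through unmodified (all patterns start with '\')
theorem repC_copy_bsfree (w new : List Char) :
    ∀ (u v : List Char), (∀ a ∈ u, a ≠ '\\') →
      repC ('\\' :: w) new (u ++ v) = u ++ repC ('\\' :: w) new v := by
  intro u
  induction u with
  | nil => intro v _; simp
  | cons a u' IH =>
    intro v hu
    have ha : a ≠ '\\' := hu a (List.mem_cons_self)
    rw [List.cons_append, repC_cons, if_neg]
    · rw [IH v (fun x hx => hu x (List.mem_cons_of_mem _ hx))]; simp
    · simp [List.isPrefixOf_iff_prefix, List.cons_prefix_cons]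
      intro hcontra
      exact absurd hcontra.symm ha

theorem not_prefix_append {x y : List Char} (h1 : ¬ x <+: y) (h2 : ¬ y <+: x) (v : List Char) :
    ¬ x <+: (y ++ v) := by
  intro h
  by_cases hle : x.length ≤ y.length
  · exact h1 (List.prefix_of_prefix_length_le h (List.prefix_append y v) hle)
  · exact h2 (List.prefix_of_prefix_length_le (List.prefix_append y v) h (by omega))

-- a pattern that neither contains nor is contained in a token passes the token through
theorem repC_pass (w u new : List Char) (hu : ∀ a ∈ u, a ≠ '\\')
    (h1 : ¬ ('\\' :: w) <+: ('\\' :: u)) (h2 : ¬ ('\\' :: u) <+: ('\\' :: w)) (v : List Char) :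
    repC ('\\' :: w) new (('\\' :: u) ++ v) = ('\\' :: u) ++ repC ('\\' :: w) new v := by
  rw [List.cons_append, repC_cons, if_neg]
  · rw [repC_copy_bsfree w new u v hu]; simp
  · rw [List.isPrefixOf_iff_prefix]
    have := not_prefix_append h1 h2 v
    rw [List.cons_append] at this
    exact this

theorem repC_match (w new : List Char) (v : List Char) :
    repC ('\\' :: w) new (('\\' :: w) ++ v) = new ++ repC ('\\' :: w) new v := by
  rw [List.cons_append, repC_cons, if_pos]
  · congr 1
    congr 1
    simp
  · rw [List.isPrefixOf_iff_prefix, ← List.cons_append]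
    exact List.prefix_append _ _

theorem repC_nomatch (old new : List Char) (c : Char) (t : List Char)
    (h : ¬ old <+: (c :: t)) :
    repC old new (c :: t) = c :: repC old new t := by
  rw [repC_cons, if_neg (by rw [List.isPrefixOf_iff_prefix]; exact h)]

-- a backslash-free prefix survives a replace in both directions
theorem prefix_reflect (p q : List Char) :
    ∀ (w : List Char), (∀ a ∈ w, a ≠ '\\') →
      ∀ t, (w <+: repC ('\\' :: p) ('\\' :: q) t) ↔ (w <+: t) := by
  intro w
  induction w with
  | nil => intro _ t; simp
  | cons a w' IH =>
    intro hw t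
    have ha : a ≠ '\\' := hw a (List.mem_cons_self)
    have hw' : ∀ x ∈ w', x ≠ '\\' := fun x hx => hw x (List.mem_cons_of_mem _ hx)
    induction t with
    | nil => simp [repC_nil]
    | cons c t' IHt =>
      rw [repC_cons]
      by_cases hp : ('\\' :: p).isPrefixOf (c :: t') = true
      · rw [if_pos hp]
        have hc : c = '\\' := by
          rw [List.isPrefixOf_iff_prefix, List.cons_prefix_cons] at hp
          exact hp.1.symm
        subst hc
        rw [List.cons_append]
        constructor <;> (intro h; rw [List.cons_prefix_cons] at h; exact absurd h.1 ha)
      · rw [if_neg hp]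
        simp only [List.cons_prefix_cons]
        constructor
        · rintro ⟨rfl, h⟩; exact ⟨rfl, (IH hw' t').mp h⟩
        · rintro ⟨rfl, h⟩; exact ⟨rfl, (IH hw' t').mpr h⟩

-- and hence through a cons as well
theorem prefix_cons_reflect (p q w : List Char) (hw : ∀ a ∈ w, a ≠ '\\') (c : Char) (t : List Char) :
    (('\\' :: w) <+: (c :: repC ('\\' :: p) ('\\' :: q) t)) ↔ (('\\' :: w) <+: (c :: t)) := by
  simp only [List.cons_prefix_cons]
  constructor
  · rintro ⟨rfl, h⟩; exact ⟨rfl, (prefix_reflect p q w hw t).mp h⟩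
  · rintro ⟨rfl, h⟩; exact ⟨rfl, (prefix_reflect p q w hw t).mpr h⟩

-- name fragments (backslash-free) of the four tokens and replacements
def nw1 : List Char := "color{blueMain}".toList
def nw2 : List Char := "color{blueAccent}".toList
def nw3 : List Char := "color{blueLight}".toList
def nw4 : List Char := "color{grayLight}".toList
def nu1 : List Char := "color{primary}".toList
def nu2 : List Char := "color{secondary}".toList
def nu3 : List Char := "color{accent}".toList
def nu4 : List Char := "color{lightgray}".toList

theorem isPrefixOf_ne_true {x y : List Char} (h : ¬ x <+: y) : ¬ x.isPrefixOf y = true :=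
  fun hh => h (List.isPrefixOf_iff_prefix.mp hh)

theorem nRules_eq : nRules =
    [('\\' :: nw1, '\\' :: nu1), ('\\' :: nw2, '\\' :: nu2),
     ('\\' :: nw3, '\\' :: nu3), ('\\' :: nw4, '\\' :: nu4)] := by simp [nRules, nw1, nw2, nw3, nw4, nu1, nu2, nu3, nu4]

theorem nScan_cons_some (c : Char) (t : List Char) (tok rep : List Char)
    (h : nRules.find? (fun r => r.1.isPrefixOf (c :: t)) = some (tok, rep)) :
    nScan (c :: t) = rep ++ nScan (t.drop (tok.length - 1)) := by
  rw [nScan, h]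

theorem nScan_cons_none (c : Char) (t : List Char)
    (h : nRules.find? (fun r => r.1.isPrefixOf (c :: t)) = none) :
    nScan (c :: t) = c :: nScan t := by
  rw [nScan, h]

theorem nScan_rule1 (v : List Char) : nScan (('\\' :: nw1) ++ v) = ('\\' :: nu1) ++ nScan v := by
  rw [List.cons_append, nScan_cons_some '\\' (nw1 ++ v) ('\\' :: nw1) ('\\' :: nu1)]
  · have hd : (nw1 ++ v).drop (('\\' :: nw1).length - 1) = v := by simp
    rw [hd]
  · rw [nRules_eq]
    simp only [List.find?_cons]
    rw [show List.isPrefixOf _ _ = true from List.isPrefixOf_iff_prefix.mpr (by rw [← List.cons_append]; exact List.prefix_append _ _)]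

theorem nScan_rule2 (v : List Char) : nScan (('\\' :: nw2) ++ v) = ('\\' :: nu2) ++ nScan v := by
  rw [List.cons_append, nScan_cons_some '\\' (nw2 ++ v) ('\\' :: nw2) ('\\' :: nu2)]
  · have hd : (nw2 ++ v).drop (('\\' :: nw2).length - 1) = v := by simp
    rw [hd]
  · rw [nRules_eq]
    simp only [List.find?_cons]
    rw [show List.isPrefixOf _ _ = false from Bool.eq_false_iff.mpr (isPrefixOf_ne_true (by rw [← List.cons_append]; exact not_prefix_append (by simp [nw1, nw2, nw3, nw4]) (by simp [nw1, nw2, nw3, nw4]) v)),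
      show List.isPrefixOf _ _ = true from List.isPrefixOf_iff_prefix.mpr (by rw [← List.cons_append]; exact List.prefix_append _ _)]

theorem nScan_rule3 (v : List Char) : nScan (('\\' :: nw3) ++ v) = ('\\' :: nu3) ++ nScan v := by
  rw [List.cons_append, nScan_cons_some '\\' (nw3 ++ v) ('\\' :: nw3) ('\\' :: nu3)]
  · have hd : (nw3 ++ v).drop (('\\' :: nw3).length - 1) = v := by simp
    rw [hd]
  · rw [nRules_eq]
    simp only [List.find?_cons]
    rw [show List.isPrefixOf _ _ = false from Bool.eq_false_iff.mpr (isPrefixOf_ne_true (by rw [← List.cons_append]; exact not_prefix_append (by simp [nw1, nw2, nw3, nw4]) (by simp [nw1, nw2, nw3, nw4]) v)),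
      show List.isPrefixOf _ _ = false from Bool.eq_false_iff.mpr (isPrefixOf_ne_true (by rw [← List.cons_append]; exact not_prefix_append (by simp [nw1, nw2, nw3, nw4]) (by simp [nw1, nw2, nw3, nw4]) v)),
      show List.isPrefixOf _ _ = true from List.isPrefixOf_iff_prefix.mpr (by rw [← List.cons_append]; exact List.prefix_append _ _)]

theorem nScan_rule4 (v : List Char) : nScan (('\\' :: nw4) ++ v) = ('\\' :: nu4) ++ nScan v := by
  rw [List.cons_append, nScan_cons_some '\\' (nw4 ++ v) ('\\' :: nw4) ('\\' :: nu4)]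
  · have hd : (nw4 ++ v).drop (('\\' :: nw4).length - 1) = v := by simp
    rw [hd]
  · rw [nRules_eq]
    simp only [List.find?_cons]
    rw [show List.isPrefixOf _ _ = false from Bool.eq_false_iff.mpr (isPrefixOf_ne_true (by rw [← List.cons_append]; exact not_prefix_append (by simp [nw1, nw2, nw3, nw4]) (by simp [nw1, nw2, nw3, nw4]) v)),
      show List.isPrefixOf _ _ = false from Bool.eq_false_iff.mpr (isPrefixOf_ne_true (by rw [← List.cons_append]; exact not_prefix_append (by simp [nw1, nw2, nw3, nw4]) (by simp [nw1, nw2, nw3, nw4]) v)),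
      show List.isPrefixOf _ _ = false from Bool.eq_false_iff.mpr (isPrefixOf_ne_true (by rw [← List.cons_append]; exact not_prefix_append (by simp [nw1, nw2, nw3, nw4]) (by simp [nw1, nw2, nw3, nw4]) v)),
      show List.isPrefixOf _ _ = true from List.isPrefixOf_iff_prefix.mpr (by rw [← List.cons_append]; exact List.prefix_append _ _)]

theorem nScan_none (c : Char) (t : List Char)
    (h1 : ¬ ('\\' :: nw1) <+: (c :: t)) (h2 : ¬ ('\\' :: nw2) <+: (c :: t))
    (h3 : ¬ ('\\' :: nw3) <+: (c :: t)) (h4 : ¬ ('\\' :: nw4) <+: (c :: t)) :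
    nScan (c :: t) = c :: nScan t := by
  apply nScan_cons_none
  rw [nRules_eq]
  simp only [List.find?_cons]
  rw [show List.isPrefixOf _ _ = false from Bool.eq_false_iff.mpr (isPrefixOf_ne_true h1),
    show List.isPrefixOf _ _ = false from Bool.eq_false_iff.mpr (isPrefixOf_ne_true h2),
    show List.isPrefixOf _ _ = false from Bool.eq_false_iff.mpr (isPrefixOf_ne_true h3),
    show List.isPrefixOf _ _ = false from Bool.eq_false_iff.mpr (isPrefixOf_ne_true h4),
    List.find?_nil]

theorem chain (n : ℕ) : ∀ (l : List Char), l.length ≤ n →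
    repC ('\\' :: nw4) ('\\' :: nu4)
      (repC ('\\' :: nw3) ('\\' :: nu3)
        (repC ('\\' :: nw2) ('\\' :: nu2)
          (repC ('\\' :: nw1) ('\\' :: nu1) l))) = nScan l := by
  induction n with
  | zero =>
    intro l h
    have hl : l = [] := by
      cases l with
      | nil => rfl
      | cons c t => simp at h
    subst hl
    rw [repC_nil, repC_nil, repC_nil, repC_nil, nScan]
  | succ n IH =>
    intro l h
    cases l with
    | nil => rw [repC_nil, repC_nil, repC_nil, repC_nil, nScan]
    | cons c t =>
      by_cases h1 : ('\\' :: nw1) <+: (c :: t)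
      · obtain ⟨v, hv⟩ := h1
        have hlen : v.length ≤ n := by
          have := congrArg List.length hv
          have hw : nw1.length = 15 := by simp [nw1]
          simp [hw] at this
          simp at h
          omega
        rw [← hv, repC_match, repC_pass nw2 nu1 _ (by simp [nw1, nw2, nw3, nw4, nu1, nu2, nu3, nu4]) (by simp [nw1, nw2, nw3, nw4, nu1, nu2, nu3, nu4]) (by simp [nw1, nw2, nw3, nw4, nu1, nu2, nu3, nu4]),
          repC_pass nw3 nu1 _ (by simp [nw1, nw2, nw3, nw4, nu1, nu2, nu3, nu4]) (by simp [nw1, nw2, nw3, nw4, nu1, nu2, nu3, nu4]) (by simp [nw1, nw2, nw3, nw4, nu1, nu2, nu3, nu4]),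
          repC_pass nw4 nu1 _ (by simp [nw1, nw2, nw3, nw4, nu1, nu2, nu3, nu4]) (by simp [nw1, nw2, nw3, nw4, nu1, nu2, nu3, nu4]) (by simp [nw1, nw2, nw3, nw4, nu1, nu2, nu3, nu4]),
          IH v hlen, nScan_rule1]
      · by_cases h2 : ('\\' :: nw2) <+: (c :: t)
        · obtain ⟨v, hv⟩ := h2
          have hlen : v.length ≤ n := by
            have := congrArg List.length hv
            have hw : nw2.length = 17 := by simp [nw2]
            simp [hw] at this
            simp at h
            omega
          rw [← hv, repC_pass nw1 nw2 _ (by simp [nw1, nw2, nw3, nw4, nu1, nu2, nu3, nu4]) (by simp [nw1, nw2, nw3, nw4, nu1, nu2, nu3, nu4]) (by simp [nw1, nw2, nw3, nw4, nu1, nu2, nu3, nu4]),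
            repC_match, repC_pass nw3 nu2 _ (by simp [nw1, nw2, nw3, nw4, nu1, nu2, nu3, nu4]) (by simp [nw1, nw2, nw3, nw4, nu1, nu2, nu3, nu4]) (by simp [nw1, nw2, nw3, nw4, nu1, nu2, nu3, nu4]),
            repC_pass nw4 nu2 _ (by simp [nw1, nw2, nw3, nw4, nu1, nu2, nu3, nu4]) (by simp [nw1, nw2, nw3, nw4, nu1, nu2, nu3, nu4]) (by simp [nw1, nw2, nw3, nw4, nu1, nu2, nu3, nu4]),
            IH v hlen, nScan_rule2]
        · by_cases h3 : ('\\' :: nw3) <+: (c :: t)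
          · obtain ⟨v, hv⟩ := h3
            have hlen : v.length ≤ n := by
              have := congrArg List.length hv
              have hw : nw3.length = 16 := by simp [nw3]
              simp [hw] at this
              simp at h
              omega
            rw [← hv, repC_pass nw1 nw3 _ (by simp [nw1, nw2, nw3, nw4, nu1, nu2, nu3, nu4]) (by simp [nw1, nw2, nw3, nw4, nu1, nu2, nu3, nu4]) (by simp [nw1, nw2, nw3, nw4, nu1, nu2, nu3, nu4]),
              repC_pass nw2 nw3 _ (by simp [nw1, nw2, nw3, nw4, nu1, nu2, nu3, nu4]) (by simp [nw1, nw2, nw3, nw4, nu1, nu2, nu3, nu4]) (by simp [nw1, nw2, nw3, nw4, nu1, nu2, nu3, nu4]),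
              repC_match, repC_pass nw4 nu3 _ (by simp [nw1, nw2, nw3, nw4, nu1, nu2, nu3, nu4]) (by simp [nw1, nw2, nw3, nw4, nu1, nu2, nu3, nu4]) (by simp [nw1, nw2, nw3, nw4, nu1, nu2, nu3, nu4]),
              IH v hlen, nScan_rule3]
          · by_cases h4 : ('\\' :: nw4) <+: (c :: t)
            · obtain ⟨v, hv⟩ := h4
              have hlen : v.length ≤ n := by
                have := congrArg List.length hv
                have hw : nw4.length = 16 := by simp [nw4]
                simp [hw] at this
                simp at h
                omega
              rw [← hv, repC_pass nw1 nw4 _ (by simp [nw1, nw2, nw3, nw4, nu1, nu2, nu3, nu4]) (by simp [nw1, nw2, nw3, nw4, nu1, nu2, nu3, nu4]) (by simp [nw1, nw2, nw3, nw4, nu1, nu2, nu3, nu4]),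
                repC_pass nw2 nw4 _ (by simp [nw1, nw2, nw3, nw4, nu1, nu2, nu3, nu4]) (by simp [nw1, nw2, nw3, nw4, nu1, nu2, nu3, nu4]) (by simp [nw1, nw2, nw3, nw4, nu1, nu2, nu3, nu4]),
                repC_pass nw3 nw4 _ (by simp [nw1, nw2, nw3, nw4, nu1, nu2, nu3, nu4]) (by simp [nw1, nw2, nw3, nw4, nu1, nu2, nu3, nu4]) (by simp [nw1, nw2, nw3, nw4, nu1, nu2, nu3, nu4]),
                repC_match, IH v hlen, nScan_rule4]
            · have hlen : t.length ≤ n := by simp at h; omega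
              have h2' : ¬ ('\\' :: nw2) <+: (c :: repC ('\\' :: nw1) ('\\' :: nu1) t) :=
                fun hh => h2 ((prefix_cons_reflect nw1 nu1 nw2 (by simp [nw2]) c t).mp hh)
              have h3' : ¬ ('\\' :: nw3) <+:
                  (c :: repC ('\\' :: nw2) ('\\' :: nu2) (repC ('\\' :: nw1) ('\\' :: nu1) t)) :=
                fun hh => h3 ((prefix_cons_reflect nw1 nu1 nw3 (by simp [nw3]) c t).mp
                  ((prefix_cons_reflect nw2 nu2 nw3 (by simp [nw3]) c _).mp hh))
              have h4' : ¬ ('\\' :: nw4) <+: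
                  (c :: repC ('\\' :: nw3) ('\\' :: nu3)
                    (repC ('\\' :: nw2) ('\\' :: nu2) (repC ('\\' :: nw1) ('\\' :: nu1) t))) :=
                fun hh => h4 ((prefix_cons_reflect nw1 nu1 nw4 (by simp [nw4]) c t).mp
                  ((prefix_cons_reflect nw2 nu2 nw4 (by simp [nw4]) c _).mp
                    ((prefix_cons_reflect nw3 nu3 nw4 (by simp [nw4]) c _).mp hh)))
              rw [repC_nomatch _ _ _ _ h1, repC_nomatch _ _ _ _ h2',
                repC_nomatch _ _ _ _ h3', repC_nomatch _ _ _ _ h4',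
                IH t hlen, nScan_none c t h1 h2 h3 h4]

-- ===== VERDICT (by name: the statement is the Claim_ definition above) =====
theorem normalize_color_names_spec : Claim_equal_normalize_color_names := by
  intro body _
  unfold Spec_normalize_color_names normalize_color_names normalize_color_names_alt
  show PySem.Str.replace (PySem.Str.replace (PySem.Str.replace (PySem.Str.replace body
    "\\color{blueMain}" "\\color{primary}") "\\color{blueAccent}" "\\color{secondary}")
    "\\color{blueLight}" "\\color{accent}") "\\color{grayLight}" "\\color{lightgray}"
    = String.ofList (nScan body.toList)
  have h : (PySem.Str.replace (PySem.Str.replace (PySem.Str.replace (PySem.Str.replace body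
      "\\color{blueMain}" "\\color{primary}") "\\color{blueAccent}" "\\color{secondary}")
      "\\color{blueLight}" "\\color{accent}") "\\color{grayLight}" "\\color{lightgray}").toList
      = nScan body.toList := by
    simp only [PySem.Str.toList_replace]
    rw [replace_eq_repC _ _ _ (by simp), replace_eq_repC _ _ _ (by simp),
      replace_eq_repC _ _ _ (by simp), replace_eq_repC _ _ _ (by simp)]
    rw [show ("\\color{blueMain}" : String).toList = '\\' :: nw1 from by simp [nw1],
      show ("\\color{primary}" : String).toList = '\\' :: nu1 from by simp [nu1],
      show ("\\color{blueAccent}" : String).toList = '\\' :: nw2 from by simp [nw2],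
      show ("\\color{secondary}" : String).toList = '\\' :: nu2 from by simp [nu2],
      show ("\\color{blueLight}" : String).toList = '\\' :: nw3 from by simp [nw3],
      show ("\\color{accent}" : String).toList = '\\' :: nu3 from by simp [nu3],
      show ("\\color{grayLight}" : String).toList = '\\' :: nw4 from by simp [nw4],
      show ("\\color{lightgray}" : String).toList = '\\' :: nu4 from by simp [nu4]]
    exact chain body.toList.length body.toList le_rfl
  calc PySem.Str.replace (PySem.Str.replace (PySem.Str.replace (PySem.Str.replace body
        "\\color{blueMain}" "\\color{primary}") "\\color{blueAccent}" "\\color{secondary}")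
        "\\color{blueLight}" "\\color{accent}") "\\color{grayLight}" "\\color{lightgray}"
      = String.ofList (PySem.Str.replace (PySem.Str.replace (PySem.Str.replace (PySem.Str.replace body
        "\\color{blueMain}" "\\color{primary}") "\\color{blueAccent}" "\\color{secondary}")
        "\\color{blueLight}" "\\color{accent}") "\\color{grayLight}" "\\color{lightgray}").toList :=
        String.ofList_toList.symm
    _ = String.ofList (nScan body.toList) := by rw [h]
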